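-- pv_equiv track=rewrite | github.com/cwirks01/NLP_Project | Lib/json_util.py | rm_list_dups_json
-- ===== SOURCE A (Python) =====
-- def rm_list_dups_json(json_ents_list):
--     # to remove duplicated
--     # from list
--     for i in json_ents_list:
--         res = []
--         for items in json_ents_list[i]:
--             if items not in res:
--                 res.append(items)
--                 res.sort()
--
--         json_ents_list.update({i: res})
--
--     return json_ents_list
-- ===== SOURCE B (Python) =====
-- def _dedup_runs(s):
--     # sorted input: emit the first element of each run of equal values,
--     # skipping the rest of the run (index scan over the suffix)
--     out = []
--     i, n = 0, len(s)
--     while i < n: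
--         x = s[i]
--         i += 1
--         while i < n and s[i] == x:
--             i += 1
--         out.append(x)
--     return out
--
--
-- def rm_list_dups_json(json_ents_list):
--     # sort each list once, then one run-skipping pass; builds a fresh dict
--     # (A mutates its argument in place; the RETURN VALUE is the same)
--     return {k: _dedup_runs(sorted(v)) for k, v in json_ents_list.items()}
-- ===== Notes on version B (the rewrite author's own statement) =====
-- stated objective: simpler
-- what changed: A dedups each list by a membership test into an accumulator that it re-sorts after every append and writes back into the dict it iterates; B sorts each list once, removes duplicates with a single run-skipping scan, and builds a fresh result dict by comprehension (same return value; A additionally mutates its argument).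
import Mathlib
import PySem

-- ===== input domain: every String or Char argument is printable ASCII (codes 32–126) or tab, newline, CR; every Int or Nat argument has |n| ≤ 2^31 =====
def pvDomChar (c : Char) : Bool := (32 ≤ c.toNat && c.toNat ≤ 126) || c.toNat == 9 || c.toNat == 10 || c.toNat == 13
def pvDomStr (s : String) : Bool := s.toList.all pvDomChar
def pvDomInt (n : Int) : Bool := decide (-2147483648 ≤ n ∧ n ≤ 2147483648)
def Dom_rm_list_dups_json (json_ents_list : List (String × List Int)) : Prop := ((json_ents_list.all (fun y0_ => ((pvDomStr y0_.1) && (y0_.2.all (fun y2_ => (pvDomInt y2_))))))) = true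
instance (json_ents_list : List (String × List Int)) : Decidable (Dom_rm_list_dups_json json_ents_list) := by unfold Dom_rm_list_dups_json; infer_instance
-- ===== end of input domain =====

-- B sorts each list once and dedups with a run-skipping scan, building a fresh dict by
-- comprehension, instead of A's membership test plus re-sort after every append with an
-- in-place dict update (simpler). A mutates its argument; only the RETURN value is compared.


-- ===== PORT A =====
-- inner loop of A: res = []; for items in vals: if items not in res: res.append(items); res.sort()
def pvDedupSortLoop (vals : List Int) : List Int :=
  vals.foldl (fun res items =>
    if items ∈ res then res else PySem.List.sorted (res ++ [items]) (fun y => y) false) []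

def rm_list_dups_json (json_ents_list : List (String × List Int)) : List (String × List Int) :=
  -- the Python parameter is a dict; the association list is read into a PySem.Dict
  let d := PySem.Dict.ofList json_ents_list
  -- for i in json_ents_list: … ; json_ents_list.update({i: res})
  -- (only values are replaced, so the iterated key sequence is d.keys; json_ents_list[i]
  --  is the current value at key i, always present)
  (d.keys.foldl (fun d2 i => d2.insert i (pvDedupSortLoop (d2.getD i []))) d).items

-- ===== PORT B =====
-- inner `while i < n and s[i] == x: i += 1` of _dedup_runs: skip the rest of a run of x's
def pvSkipEq (x : Int) : List Int → List Int
  | [] => []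
  | y :: r => if y = x then pvSkipEq x r else y :: r

lemma pvSkipEq_length_le (x : Int) : ∀ l : List Int, (pvSkipEq x l).length ≤ l.length := by
  intro l
  induction l with
  | nil => simp [pvSkipEq]
  | cons y r ih =>
    simp only [pvSkipEq]
    split
    · simp only [List.length_cons]; omega
    · simp

-- _dedup_runs: the outer index scan over the suffix s[i:], as structural recursion on it
def pvDedupRuns : List Int → List Int
  | [] => []
  | x :: r => x :: pvDedupRuns (pvSkipEq x r)
termination_by l => l.length
decreasing_by simpa using Nat.lt_succ_of_le (pvSkipEq_length_le x r)

def rm_list_dups_json_alt (json_ents_list : List (String × List Int)) : List (String × List Int) :=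
  -- dict comprehension over json_ents_list.items(): the keys of a dict's items are
  -- distinct, so no insertion ever overwrites and the result dict's association list
  -- is exactly this map, in the same order (exact)
  (PySem.Dict.ofList json_ents_list).items.map
    (fun kv => (kv.1, pvDedupRuns (PySem.List.sorted kv.2 (fun y => y) false)))

-- ===== PRECONDITION & SPEC =====
def Spec_rm_list_dups_json (json_ents_list : List (String × List Int)) (out : List (String × List Int)) : Prop := out = rm_list_dups_json_alt json_ents_list
instance (json_ents_list : List (String × List Int)) (out : List (String × List Int)) : Decidable (Spec_rm_list_dups_json json_ents_list out) := by unfold Spec_rm_list_dups_json; infer_instance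

-- ===== CLAIM (what is proved, stated in full; the proofs are below) =====
def Claim_equal_rm_list_dups_json : Prop := ∀ (json_ents_list : List (String × List Int)), Dom_rm_list_dups_json json_ents_list → Spec_rm_list_dups_json json_ents_list (rm_list_dups_json json_ents_list)

-- ===== LEMMAS AND PROOFS =====

-- two strictly increasing lists with the same members are equal
lemma strict_sorted_eq (a b : List Int) (ha : a.Pairwise (· < ·)) (hb : b.Pairwise (· < ·))
    (h : ∀ x, x ∈ a ↔ x ∈ b) : a = b := by
  have hna : a.Nodup := ha.imp (fun h => ne_of_lt h)
  have hnb : b.Nodup := hb.imp (fun h => ne_of_lt h)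
  have hp : a.Perm b := (List.perm_ext_iff_of_nodup hna hnb).2 h
  exact hp.eq_of_pairwise (fun x hx y hy h1 h2 => le_antisymm h1 h2)
    (ha.imp le_of_lt) (hb.imp le_of_lt)

lemma dedupSortLoop_inv (vals : List Int) :
    ∀ acc : List Int, acc.Pairwise (· < ·) →
    (vals.foldl (fun res items =>
        if items ∈ res then res else PySem.List.sorted (res ++ [items]) (fun y => y) false) acc).Pairwise (· < ·) ∧
    (∀ y, y ∈ vals.foldl (fun res items =>
        if items ∈ res then res else PySem.List.sorted (res ++ [items]) (fun y => y) false) acc ↔ y ∈ acc ∨ y ∈ vals) := by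
  induction vals with
  | nil => intro acc ha; simpa using ha
  | cons x xs ih =>
    intro acc ha
    simp only [List.foldl_cons]
    by_cases hx : x ∈ acc
    · simp only [if_pos hx]
      obtain ⟨h1, h2⟩ := ih acc ha
      refine ⟨h1, fun y => ?_⟩
      rw [h2 y]
      constructor
      · rintro (h | h) <;> simp [h]
      · rintro (h | h)
        · exact Or.inl h
        · rcases List.mem_cons.1 h with rfl | h
          · exact Or.inl hx
          · exact Or.inr h
    · simp only [if_neg hx]
      have hnd : (acc ++ [x]).Nodup := by
        refine List.nodup_append.2 ⟨ha.imp (fun h => ne_of_lt h), List.nodup_singleton x, ?_⟩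
        intro y hy z hz
        rw [List.mem_singleton] at hz
        subst hz; exact fun h => hx (h ▸ hy)
      have hperm := PySem.List.sorted_perm (xs := acc ++ [x]) (key := fun y => y) (rev := false)
      have hnds : (PySem.List.sorted (acc ++ [x]) (fun y => y) false).Nodup := hperm.symm.nodup hnd
      have hle : (PySem.List.sorted (acc ++ [x]) (fun y => y) false).Pairwise (· ≤ ·) := by
        have := PySem.List.sorted_pairwise (xs := acc ++ [x]) (key := fun y => y)
        simpa using this
      have hlt : (PySem.List.sorted (acc ++ [x]) (fun y => y) false).Pairwise (· < ·) := by
        have := hle.and hnds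
        exact this.imp (fun ⟨h1, h2⟩ => lt_of_le_of_ne h1 h2)
      obtain ⟨h1, h2⟩ := ih _ hlt
      refine ⟨h1, fun y => ?_⟩
      rw [h2 y]
      simp [PySem.List.mem_sorted]
      tauto

-- pvSkipEq only drops elements, in place
lemma pvSkipEq_sublist (x : Int) : ∀ l : List Int, (pvSkipEq x l).Sublist l := by
  intro l
  induction l with
  | nil => simp [pvSkipEq]
  | cons y r ih =>
    simp only [pvSkipEq]
    split
    · exact ih.trans (List.sublist_cons_self y r)
    · exact List.Sublist.refl _

-- everything pvSkipEq drops equals x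
lemma mem_cons_iff_skip (x : Int) : ∀ (l : List Int) (y : Int),
    (y ∈ x :: l) ↔ (y = x ∨ y ∈ pvSkipEq x l) := by
  intro l
  induction l with
  | nil => intro y; simp [pvSkipEq]
  | cons z r ih =>
    intro y
    simp only [pvSkipEq]
    by_cases hz : z = x
    · subst hz
      rw [if_pos rfl, ← ih y]
      simp
    · rw [if_neg hz]
      simp

-- head bound passes through pvSkipEq and becomes strict
lemma skip_strict_bound (x : Int) : ∀ l : List Int, l.Pairwise (· ≤ ·) →
    (∀ y ∈ l, x ≤ y) → ∀ y ∈ pvSkipEq x l, x < y := by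
  intro l
  induction l with
  | nil => simp [pvSkipEq]
  | cons z r ih =>
    intro hp hb
    simp only [pvSkipEq]
    by_cases hz : z = x
    · rw [if_pos hz]
      exact ih (List.pairwise_cons.1 hp).2 (fun y hy => hb y (List.mem_cons_of_mem _ hy))
    · rw [if_neg hz]
      intro y hy
      have hxz : x < z := lt_of_le_of_ne (hb z List.mem_cons_self) (fun h => hz h.symm)
      rcases List.mem_cons.1 hy with rfl | hy
      · exact hxz
      · exact lt_of_lt_of_le hxz ((List.pairwise_cons.1 hp).1 y hy)

-- on a ≤-sorted list, pvDedupRuns is strictly increasing with the same members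
lemma runs_inv (s : List Int) : s.Pairwise (· ≤ ·) →
    (pvDedupRuns s).Pairwise (· < ·) ∧ (∀ y, y ∈ pvDedupRuns s ↔ y ∈ s) := by
  induction s using pvDedupRuns.induct with
  | case1 => simp [pvDedupRuns]
  | case2 x r ih =>
    intro hp
    have hp' : r.Pairwise (· ≤ ·) := (List.pairwise_cons.1 hp).2
    have hskip : (pvSkipEq x r).Pairwise (· ≤ ·) := hp'.sublist (pvSkipEq_sublist x r)
    obtain ⟨h1, h2⟩ := ih hskip
    have hbound : ∀ y ∈ pvSkipEq x r, x < y :=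
      skip_strict_bound x r hp' (fun y hy => (List.pairwise_cons.1 hp).1 y hy)
    constructor
    · rw [pvDedupRuns, List.pairwise_cons]
      exact ⟨fun y hy => hbound y ((h2 y).1 hy), h1⟩
    · intro y
      rw [pvDedupRuns, List.mem_cons, h2 y, mem_cons_iff_skip x r y]

-- the two per-list computations agree
lemma inner_eq (vals : List Int) :
    pvDedupSortLoop vals = pvDedupRuns (PySem.List.sorted vals (fun y => y) false) := by
  obtain ⟨ha1, ha2⟩ := dedupSortLoop_inv vals [] List.Pairwise.nil
  have hsle : (PySem.List.sorted vals (fun y => y) false).Pairwise (· ≤ ·) := by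
    have := PySem.List.sorted_pairwise (xs := vals) (key := fun y => y)
    simpa using this
  obtain ⟨hb1, hb2⟩ := runs_inv (PySem.List.sorted vals (fun y => y) false) hsle
  unfold pvDedupSortLoop
  apply strict_sorted_eq _ _ ha1 hb1
  intro x
  rw [ha2 x, hb2 x]
  simp [PySem.List.mem_sorted]

-- A's fold of in-place inserts, seen as a map over the unchanged item list
lemma foldA (t : List Int → List Int) :
    ∀ (ks : List String) (d : PySem.Dict String (List Int)), d.keys.Nodup → ks.Nodup →
    (∀ k ∈ ks, d.contains k = true) →
    (ks.foldl (fun d2 i => d2.insert i (t (d2.getD i []))) d).items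
      = d.items.map (fun kv => if kv.1 ∈ ks then (kv.1, t kv.2) else kv) := by
  intro ks
  induction ks with
  | nil => intro d _ _ _; simp
  | cons i ks ih =>
    intro d hnd hks hcont
    simp only [List.foldl_cons]
    have hci : d.contains i = true := hcont i List.mem_cons_self
    have hrec := ih (d.insert i (t (d.getD i []))) (PySem.Dict.nodup_keys_insert d i _ hnd)
      (List.nodup_cons.1 hks).2
      (by intro k hk
          rw [PySem.Dict.contains_insert]
          simp [hcont k (List.mem_cons_of_mem _ hk)])
    rw [hrec, PySem.Dict.items_insert_of_contains _ _ hci, List.map_map]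
    apply List.map_congr_left
    intro p hp
    simp only [Function.comp_apply, beq_iff_eq, List.mem_cons]
    by_cases hpi : p.1 = i
    · have hp2 : d.getD i [] = p.2 := by
        rw [← hpi]; exact PySem.Dict.getD_of_mem_items d (by exact hp) hnd []
      have hinks : i ∉ ks := (List.nodup_cons.1 hks).1
      simp [hpi, hinks, hp2]
    · by_cases h2 : p.1 ∈ ks <;> simp [hpi, h2]

-- ===== VERDICT (by name: the statement is the Claim_ definition above) =====
theorem rm_list_dups_json_spec : Claim_equal_rm_list_dups_json := by
  intro l _
  show rm_list_dups_json l = rm_list_dups_json_alt l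
  unfold rm_list_dups_json rm_list_dups_json_alt
  have hnd : (PySem.Dict.ofList l).keys.Nodup := PySem.Dict.nodup_keys_ofList l
  have hA := foldA pvDedupSortLoop (PySem.Dict.ofList l).keys (PySem.Dict.ofList l) hnd hnd
    (fun k hk => (PySem.Dict.contains_iff_mem_keys _ k).2 hk)
  rw [hA]
  apply List.map_congr_left
  intro kv hkv
  have hk1 : kv.1 ∈ (PySem.Dict.ofList l).keys := PySem.Dict.mem_keys_of_mem_items _ hkv
  rw [if_pos hk1, inner_eq]
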